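-- pv_equiv track=rewrite | github.com/dnishiyama/wiktionary_scraper | ety_utils.py | getWordFromChars
-- ===== SOURCE A (Python) =====
-- def getWordFromChars(char_nums, char_vocab):
--     chars = [char_vocab[char] for char in char_nums if char_vocab[char] != '<PAD>']; chars
--     spaces = [i for i,char in enumerate(chars) if char == ' ']; spaces
--     words = []; start_index = - 1
--     for i in range(len(spaces)):
--         index = spaces[i]
--         words.append(''.join(chars[start_index + 1 : index]))
--         start_index = index
--     words.append(''.join(chars[start_index + 1:]))
--
--     return words
-- ===== SOURCE B (Python) =====
-- def getWordFromChars(char_nums, char_vocab):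
--     # One pass with an accumulator: split into words as we decode, no index lists or slicing.
--     words = []
--     cur = ''
--     for c in char_nums:
--         tok = char_vocab[c]
--         if tok == '<PAD>':
--             continue
--         if tok == ' ':
--             words.append(cur)
--             cur = ''
--         else:
--             cur += tok
--     words.append(cur)
--     return words
-- ===== Notes on version B (the rewrite author's own statement) =====
-- stated objective: simpler
-- what changed: A first materialises the decoded token list, then a list of space positions, then walks those positions slicing and joining segments; B does one accumulator pass over char_nums, growing the current word and flushing it at each space.
import Mathlib
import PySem

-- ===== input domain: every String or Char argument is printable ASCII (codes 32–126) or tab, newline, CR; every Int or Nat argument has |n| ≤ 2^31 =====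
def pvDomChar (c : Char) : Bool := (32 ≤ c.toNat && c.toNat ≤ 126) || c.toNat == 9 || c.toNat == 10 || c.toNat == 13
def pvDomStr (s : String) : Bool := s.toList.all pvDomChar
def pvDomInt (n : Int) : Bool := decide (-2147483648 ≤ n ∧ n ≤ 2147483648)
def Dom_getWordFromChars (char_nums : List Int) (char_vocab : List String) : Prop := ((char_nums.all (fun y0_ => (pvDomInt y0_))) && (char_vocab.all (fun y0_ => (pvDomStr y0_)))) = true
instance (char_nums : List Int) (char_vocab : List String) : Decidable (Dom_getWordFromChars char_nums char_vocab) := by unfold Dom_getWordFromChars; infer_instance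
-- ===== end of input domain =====

-- B replaces A's space-index list and index-walking slice loop by a single accumulator pass (objective: simpler).

-- ===== PORT A =====
-- chars = [char_vocab[char] for char in char_nums if char_vocab[char] != '<PAD>']
def pvCharsA (char_nums : List Int) (char_vocab : List String) : List String :=
  char_nums.filterMap (fun c =>
    match PySem.List.pyGet? char_vocab c with   -- none = IndexError, excluded by Pre_
    | some s => if s = "<PAD>" then none else some s
    | none => none)

-- one iteration of A's 'for i in range(len(spaces))' loop body, state = (words, start_index)
def pvStepA (chars : List String) (st : List String × Int) (index : Int) : List String × Int :=
  (st.1 ++ [PySem.Str.join "" (PySem.List.slice chars (some (st.2 + 1)) (some index))], index)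

def getWordFromChars (char_nums : List Int) (char_vocab : List String) : List String :=
  let chars := pvCharsA char_nums char_vocab
  let spaces := (PySem.List.enumerate chars).filterMap (fun p => if p.2 = " " then some p.1 else none)
  let st := (PySem.List.pyRange 0 (PySem.List.len spaces)).foldl
      (fun st i => pvStepA chars st (PySem.List.pyGetD spaces i 0)) ([], -1)
  st.1 ++ [PySem.Str.join "" (PySem.List.slice chars (some (st.2 + 1)) none)]

-- ===== PORT B =====
-- one iteration of B's loop, state = (words, cur)
def pvStepB (char_vocab : List String) (st : List String × String) (c : Int) : List String × String :=
  match PySem.List.pyGet? char_vocab c with   -- none = IndexError, excluded by Pre_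
  | none => st
  | some tok =>
    if tok = "<PAD>" then st
    else if tok = " " then (st.1 ++ [st.2], "")
    else (st.1, st.2 ++ tok)

def getWordFromChars_alt (char_nums : List Int) (char_vocab : List String) : List String :=
  let st := char_nums.foldl (pvStepB char_vocab) ([], "")
  st.1 ++ [st.2]

-- ===== PRECONDITION & SPEC =====
-- Pre_ excludes exactly the inputs where char_vocab[char] raises IndexError in Python (both A and B raise there).
def Pre_getWordFromChars (char_nums : List Int) (char_vocab : List String) : Prop :=
  ∀ c ∈ char_nums, PySem.Raise.InRange char_vocab.length c
instance (char_nums : List Int) (char_vocab : List String) : Decidable (Pre_getWordFromChars char_nums char_vocab) := by unfold Pre_getWordFromChars; infer_instance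
def pvWitness_getWordFromChars : List Int × List String := ([0, 1, 2, 1, 0, 0], ["ab", " ", "<PAD>"])

def Spec_getWordFromChars (char_nums : List Int) (char_vocab : List String) (out : List String) : Prop := out = getWordFromChars_alt char_nums char_vocab
instance (char_nums : List Int) (char_vocab : List String) (out : List String) : Decidable (Spec_getWordFromChars char_nums char_vocab out) := by unfold Spec_getWordFromChars; infer_instance

-- ===== CLAIM (what is proved, stated in full; the proofs are below) =====
def Claim_equal_getWordFromChars : Prop := ∀ (char_nums : List Int) (char_vocab : List String), Dom_getWordFromChars char_nums char_vocab → Pre_getWordFromChars char_nums char_vocab → Spec_getWordFromChars char_nums char_vocab (getWordFromChars char_nums char_vocab)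

-- ===== LEMMAS AND PROOFS =====

theorem pvJoin_nil : PySem.Str.join "" ([] : List String) = "" := rfl

-- ''.join distributes over cons / snoc
theorem pvJoin_cons (x : String) (l : List String) :
    PySem.Str.join "" (x :: l) = x ++ PySem.Str.join "" l := by
  cases l with
  | nil =>
    rw [pvJoin_nil, String.append_empty]
    apply String.toList_inj.mp
    simp [PySem.Str.toList_join, PySem.Chars.join_singleton]
  | cons y ys =>
    apply String.toList_inj.mp
    simp [PySem.Str.toList_join, PySem.Chars.join_cons_cons]

theorem pvJoin_snoc (l : List String) (x : String) :
    PySem.Str.join "" (l ++ [x]) = PySem.Str.join "" l ++ x := by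
  induction l with
  | nil => simp [pvJoin_cons, pvJoin_nil, String.empty_append, String.append_empty]
  | cons a l ih => rw [List.cons_append, pvJoin_cons, ih, pvJoin_cons, String.append_assoc]

theorem pvModifyHead_empty (l : List String) :
    l.modifyHead (fun x => "" ++ x) = l := by
  cases l <;> simp [String.empty_append]

-- B's loop, fully generalized over accumulated words and current word
theorem pvB_inv (char_vocab : List String) (nums : List Int) :
    ∀ (ws : List String) (cur : String),
      (let st := nums.foldl (pvStepB char_vocab) (ws, cur); st.1 ++ [st.2])
        = ws ++ ((((pvCharsA nums char_vocab).splitOnP (· == " ")).map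
              (PySem.Str.join "")).modifyHead (cur ++ ·)) := by
  induction nums with
  | nil =>
    intro ws cur
    simp [pvCharsA, List.splitOnP_nil, pvJoin_nil, String.append_empty]
  | cons c nums ih =>
    intro ws cur
    rw [List.foldl_cons]
    cases hget : PySem.List.pyGet? char_vocab c with
    | none =>
      have hch : pvCharsA (c :: nums) char_vocab = pvCharsA nums char_vocab := by
        simp [pvCharsA, hget]
      rw [show pvStepB char_vocab (ws, cur) c = (ws, cur) by simp [pvStepB, hget]]
      rw [ih ws cur, hch]
    | some tok =>
      by_cases hpad : tok = "<PAD>"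
      · have hch : pvCharsA (c :: nums) char_vocab = pvCharsA nums char_vocab := by
          simp [pvCharsA, hget, hpad]
        rw [show pvStepB char_vocab (ws, cur) c = (ws, cur) by simp [pvStepB, hget, hpad]]
        rw [ih ws cur, hch]
      · have hch : pvCharsA (c :: nums) char_vocab = tok :: pvCharsA nums char_vocab := by
          simp [pvCharsA, hget, hpad]
        by_cases hsp : tok = " "
        · rw [show pvStepB char_vocab (ws, cur) c = (ws ++ [cur], "") by
            simp [pvStepB, hget, hsp]]
          rw [ih (ws ++ [cur]) "", hch, List.splitOnP_cons]
          simp only [pvModifyHead_empty]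
          simp [hsp, pvJoin_nil, String.append_empty]
        · rw [show pvStepB char_vocab (ws, cur) c = (ws, cur ++ tok) by
            simp [pvStepB, hget, hpad, hsp]]
          rw [ih ws (cur ++ tok), hch, List.splitOnP_cons]
          simp only [beq_iff_eq, hsp, if_false]
          cases h : (pvCharsA nums char_vocab).splitOnP (· == " ") with
          | nil => simp
          | cons hd tl => simp [pvJoin_cons, String.append_assoc]

-- A's loop over the space positions, generalized: s = how far chars has been consumed,
-- b = one past the last space seen (start_index + 1), ws = words so far
theorem pvA_inv (chars : List String) (tl : List String) :
    ∀ (s b : Nat) (ws : List String), b ≤ s → chars.drop s = tl →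
      (let st := ((PySem.List.enumerate tl (s : Int)).filterMap
            (fun p => if p.2 = " " then some p.1 else none)).foldl (pvStepA chars) (ws, (b : Int) - 1);
        st.1 ++ [PySem.Str.join "" (PySem.List.slice chars (some (st.2 + 1)) none)])
        = ws ++ (((tl.splitOnP (· == " ")).map (PySem.Str.join "")).modifyHead
              (PySem.Str.join "" ((chars.drop b).take (s - b)) ++ ·)) := by
  induction tl with
  | nil =>
    intro s b ws hbs hdrop
    have hb1 : (b : Int) - 1 + 1 = (b : Nat) := by omega
    have hlen : chars.length ≤ s := List.drop_eq_nil_iff.mp hdrop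
    have htake : (chars.drop b).take (s - b) = chars.drop b := by
      apply List.take_of_length_le; simp; omega
    simp only [PySem.List.enumerate_nil, List.filterMap_nil, List.foldl_nil, hb1,
      PySem.List.slice_from_natCast, List.splitOnP_nil, List.map_cons, List.map_nil,
      List.modifyHead_cons, htake]
    simp [pvJoin_nil, String.append_empty]
  | cons t ts ih =>
    intro s b ws hbs hdrop
    have hdrop' : chars.drop (s + 1) = ts := by
      rw [← List.tail_drop, hdrop]; rfl
    rw [PySem.List.enumerate_cons]
    by_cases hsp : t = " "
    · have hfm : List.filterMap (fun p : Int × String => if p.2 = " " then some p.1 else none)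
          (((s : Int), t) :: PySem.List.enumerate ts ((s : Int) + 1))
          = (s : Int) :: List.filterMap (fun p : Int × String => if p.2 = " " then some p.1 else none)
              (PySem.List.enumerate ts ((s : Int) + 1)) := by
        rw [List.filterMap_cons]; simp [hsp]
      rw [hfm, List.foldl_cons]
      have hstep : pvStepA chars (ws, (b : Int) - 1) (s : Int)
          = (ws ++ [PySem.Str.join "" ((chars.drop b).take (s - b))], (s : Int)) := by
        simp only [pvStepA]
        rw [show (b : Int) - 1 + 1 = ((b : Nat) : Int) by omega, PySem.List.slice_natCast]
      rw [hstep]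
      have hcast : (s : Int) + 1 = ((s + 1 : Nat) : Int) := by push_cast; ring
      have hs' : (s : Int) = ((s + 1 : Nat) : Int) - 1 := by push_cast; ring
      rw [hcast, hs']
      rw [ih (s + 1) (s + 1) (ws ++ [PySem.Str.join "" ((chars.drop b).take (s - b))])
        (le_refl _) hdrop']
      simp only [Nat.sub_self, List.take_zero]
      rw [List.splitOnP_cons]
      simp only [beq_iff_eq, hsp, if_pos rfl]
      rw [pvJoin_nil, pvModifyHead_empty]
      simp [pvJoin_nil, String.append_empty]
    · have hfm : List.filterMap (fun p : Int × String => if p.2 = " " then some p.1 else none)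
          (((s : Int), t) :: PySem.List.enumerate ts ((s : Int) + 1))
          = List.filterMap (fun p : Int × String => if p.2 = " " then some p.1 else none)
              (PySem.List.enumerate ts ((s : Int) + 1)) := by
        rw [List.filterMap_cons]; simp [hsp]
      rw [hfm]
      have hcast : (s : Int) + 1 = ((s + 1 : Nat) : Int) := by push_cast; ring
      rw [hcast]
      rw [ih (s + 1) b ws (by omega) hdrop']
      rw [List.splitOnP_cons]
      simp only [beq_iff_eq, hsp, if_false]
      have hget : chars[s]? = some t := by
        have : (chars.drop s)[0]? = some t := by rw [hdrop]; rfl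
        rwa [List.getElem?_drop, Nat.add_zero] at this
      have htake : (chars.drop b).take (s + 1 - b) = (chars.drop b).take (s - b) ++ [t] := by
        have h1 : s + 1 - b = (s - b) + 1 := by omega
        rw [h1, List.take_add_one]
        have : (chars.drop b)[s - b]? = some t := by
          rw [List.getElem?_drop, show b + (s - b) = s by omega, hget]
        rw [this]; rfl
      rw [htake, pvJoin_snoc]
      cases h : ts.splitOnP (· == " ") with
      | nil => simp
      | cons hd tl' => simp [pvJoin_cons, String.append_assoc]

-- ===== VERDICT (by name: the statement is the Claim_ definition above) =====
theorem getWordFromChars_spec : Claim_equal_getWordFromChars := by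
  intro char_nums char_vocab _ _
  unfold Spec_getWordFromChars
  simp only [getWordFromChars, getWordFromChars_alt]
  rw [PySem.List.foldl_pyRange_pyGetD _ _ _ _ (le_refl 0)]
  simp only [Int.toNat_zero, List.drop_zero]
  have hA := pvA_inv (pvCharsA char_nums char_vocab) (pvCharsA char_nums char_vocab)
    0 0 [] (le_refl 0) List.drop_zero
  simp only [Nat.cast_zero, zero_sub, Nat.sub_self, List.take_zero, List.nil_append] at hA
  have hB := pvB_inv char_vocab char_nums [] ""
  simp only [List.nil_append] at hB
  rw [hA, hB]
  rw [pvJoin_nil]
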